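-- pv_equiv track=rewrite | github.com/zhengjiani/pyAlgorithm | leetcode/prac19.py | pmt
-- ===== SOURCE A (Python) =====
-- def pmt(s):
--     prefix = set()
--     postfix = set()
--     ret = [0]
--     for i in range(1, len(s)):
--         prefix.add(s[:i])
--         postfix = {s[j:i + 1] for j in range(1, i + 1)}
--         ret.append(len(prefix & postfix))
--     return ret
-- ===== SOURCE B (Python) =====
-- def pmt(s):
--     ret = [0]
--     for i in range(1, len(s)):
--         c = 0
--         for j in range(1, i + 1):
--             if s[:j] == s[i + 1 - j:i + 1]:
--                 c += 1
--         ret.append(c)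
--     return ret
-- ===== Notes on version B (the rewrite author's own statement) =====
-- stated objective: simpler
-- what changed: B drops the two sets and the set intersection entirely: since a string in both sets is a prefix and a suffix of the same length, it directly counts the lengths j with s[:j] == s[i+1-j:i+1].
import Mathlib
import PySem

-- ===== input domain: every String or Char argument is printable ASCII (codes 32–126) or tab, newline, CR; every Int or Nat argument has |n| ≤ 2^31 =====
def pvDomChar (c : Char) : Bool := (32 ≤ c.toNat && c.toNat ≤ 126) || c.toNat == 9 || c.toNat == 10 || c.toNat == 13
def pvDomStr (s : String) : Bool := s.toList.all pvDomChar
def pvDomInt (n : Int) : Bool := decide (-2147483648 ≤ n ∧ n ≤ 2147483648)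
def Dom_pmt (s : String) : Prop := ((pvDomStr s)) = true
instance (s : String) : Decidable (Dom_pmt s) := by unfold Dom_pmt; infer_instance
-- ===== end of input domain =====

-- B replaces A's two sets and set intersection by a direct count of the lengths j with s[:j] == s[i+1-j:i+1] (same values; no speed claim).

-- ===== PORT A =====
-- one loop iteration of A: add s[:i] to prefix, rebuild postfix, append len(prefix & postfix)
def pmtStepA (cs : List Char) (st : PySem.Set (List Char) × List Int) (i : Int) :
    PySem.Set (List Char) × List Int :=
  let pre := PySem.Set.add st.1 (PySem.List.slice cs none (some i))
  let post : PySem.Set (List Char) := PySem.Set.ofList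
    ((PySem.List.pyRange 1 (i + 1) 1).map (fun j => PySem.List.slice cs (some j) (some (i + 1))))
  (pre, st.2 ++ [PySem.Set.len (PySem.Set.inter pre post)])

def pmt (s : String) : List Int :=
  ((PySem.List.pyRange 1 (PySem.Str.len s) 1).foldl (pmtStepA s.toList)
    (PySem.Set.empty, [0])).2

-- ===== PORT B =====
-- inner loop of B: count j in 1..i with s[:j] == s[i+1-j:i+1]
def pmtCnt (cs : List Char) (i : Int) : Int :=
  (PySem.List.pyRange 1 (i + 1) 1).foldl
    (fun c j =>
      if PySem.List.slice cs none (some j) = PySem.List.slice cs (some (i + 1 - j)) (some (i + 1))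
      then c + 1 else c) 0

def pmt_alt (s : String) : List Int :=
  (PySem.List.pyRange 1 (PySem.Str.len s) 1).foldl
    (fun ret i => ret ++ [pmtCnt s.toList i]) [0]

-- ===== PRECONDITION & SPEC =====
def Spec_pmt (s : String) (out : List Int) : Prop := out = pmt_alt s
instance (s : String) (out : List Int) : Decidable (Spec_pmt s out) := by unfold Spec_pmt; infer_instance

-- ===== CLAIM (what is proved, stated in full; the proofs are below) =====
def Claim_equal_pmt : Prop := ∀ (s : String), Dom_pmt s → Spec_pmt s (pmt s)

-- ===== LEMMAS AND PROOFS =====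

-- number of proper borders of cs.take (i): count of k < i with take (k+1) a suffix of take (i)
def borderCnt (cs : List Char) (i : Nat) : Nat :=
  (List.range i).countP (fun k => decide (cs.take (k + 1) = (cs.drop (i - k)).take (k + 1)))

def preList (cs : List Char) (m : Nat) : List (List Char) :=
  (List.range m).map (fun k => cs.take (k + 1))

theorem pmtCnt_eq (cs : List Char) (i : Nat) :
    pmtCnt cs (i : Int) = (borderCnt cs i : Int) := by
  unfold pmtCnt borderCnt
  rw [PySem.List.pyRange_one]
  have h1 : ((i : Int) + 1 - 1).toNat = i := by omega
  rw [h1, List.foldl_map, PySem.List.foldl_ite_add_one, zero_add]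
  congr 1
  apply List.countP_congr
  intro k hk
  have hk' : k < i := List.mem_range.mp hk
  have e1 : (1 : Int) + (k : Int) = ((k + 1 : Nat) : Int) := by push_cast; ring
  have e2 : (i : Int) + 1 - ((k + 1 : Nat) : Int) = ((i - k : Nat) : Int) := by push_cast; omega
  have e3 : (i : Int) + 1 = ((i + 1 : Nat) : Int) := by push_cast; ring
  rw [e1, e2, e3, PySem.List.slice_to_natCast, PySem.List.slice_natCast]
  have e4 : i + 1 - (i - k) = k + 1 := by omega
  rw [e4]

theorem stepA_eq (cs : List Char) (r : List Int) (i : Nat) (h1 : 1 ≤ i) (h2 : i < cs.length) :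
    pmtStepA cs (preList cs (i - 1), r) (i : Int)
      = (preList cs i, r ++ [(borderCnt cs i : Int)]) := by
  unfold pmtStepA
  have hsl : PySem.List.slice cs none (some (i : Int)) = cs.take i :=
    PySem.List.slice_to_natCast cs i
  have hnm : cs.take i ∉ preList cs (i - 1) := by
    intro hmem
    rcases List.mem_map.mp hmem with ⟨k, hk, he⟩
    have hk' : k < i - 1 := List.mem_range.mp hk
    have := congrArg List.length he
    simp [List.length_take] at this
    omega
  have hpre : PySem.Set.add (preList cs (i - 1)) (cs.take i) = preList cs i := by
    rw [PySem.Set.add_of_not_mem hnm]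
    unfold preList
    have : i = (i - 1) + 1 := by omega
    conv_rhs => rw [this, List.range_succ]
    simp
    omega
  -- the postfix set is the list of suffixes of cs.take (i+1), lengths i down to 1
  have hpostmap : (PySem.List.pyRange 1 ((i : Int) + 1) 1).map
        (fun j => PySem.List.slice cs (some j) (some ((i : Int) + 1)))
      = (List.range i).map (fun k => (cs.drop (k + 1)).take (i - k)) := by
    rw [PySem.List.pyRange_one]
    have h1 : ((i : Int) + 1 - 1).toNat = i := by omega
    rw [h1, List.map_map]
    apply List.map_congr_left
    intro k hk
    have hk' : k < i := List.mem_range.mp hk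
    have e1 : (1 : Int) + (k : Int) = ((k + 1 : Nat) : Int) := by push_cast; ring
    have e3 : (i : Int) + 1 = ((i + 1 : Nat) : Int) := by push_cast; ring
    simp only [Function.comp, e1, e3, PySem.List.slice_natCast]
    have : i + 1 - (k + 1) = i - k := by omega
    rw [this]
  have hlen : ∀ k, k < i → ((cs.drop (k + 1)).take (i - k)).length = i - k := by
    intro k hk
    simp [List.length_take, List.length_drop]
    omega
  have hnd : ((List.range i).map (fun k => (cs.drop (k + 1)).take (i - k))).Nodup := by
    apply List.Nodup.map_on _ (List.nodup_range)
    intro x hx y hy he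
    have hx' : x < i := List.mem_range.mp hx
    have hy' : y < i := List.mem_range.mp hy
    have := congrArg List.length he
    rw [hlen x hx', hlen y hy'] at this
    omega
  have hmemb : ∀ k, k < i →
      ((List.range i).map (fun k => (cs.drop (k + 1)).take (i - k))).contains (cs.take (k + 1))
      = decide (cs.take (k + 1) = (cs.drop (i - k)).take (k + 1)) := by
    intro k hk
    rw [Bool.eq_iff_iff]
    simp only [List.contains_iff_mem, List.mem_map, List.mem_range, decide_eq_true_eq]
    constructor
    · rintro ⟨k', hk', he⟩
      have hl := congrArg List.length he
      rw [hlen k' hk'] at hl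
      simp [List.length_take] at hl
      have hke : k' = i - k - 1 := by omega
      subst hke
      have e1 : i - k - 1 + 1 = i - k := by omega
      have e2 : i - (i - k - 1) = k + 1 := by omega
      rw [e1, e2] at he
      exact he.symm
    · intro he
      refine ⟨i - k - 1, by omega, ?_⟩
      have e1 : i - k - 1 + 1 = i - k := by omega
      have e2 : i - (i - k - 1) = k + 1 := by omega
      rw [e1, e2]
      exact he.symm
  rw [hsl, hpre, hpostmap, PySem.Set.ofList_eq_self_of_nodup _ hnd]
  refine Prod.ext rfl ?_
  simp only []
  congr 2
  unfold PySem.Set.len PySem.Set.inter PySem.Set.contains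
  rw [← List.countP_eq_length_filter]
  unfold preList borderCnt
  rw [List.countP_map]
  congr 1
  apply List.countP_congr
  intro k hk
  have hk' : k < i := List.mem_range.mp hk
  simpa using hmemb k hk'

theorem foldA_eq (cs : List Char) (m : Nat) (hm : m ≤ cs.length) :
    (PySem.List.pyRange 1 (m : Int) 1).foldl (pmtStepA cs) (PySem.Set.empty, [0])
      = (preList cs (m - 1), (0 : Int) :: (List.range (m - 1)).map (fun t => (borderCnt cs (t + 1) : Int))) := by
  induction m with
  | zero => rw [PySem.List.pyRange_one_eq_nil (by norm_num)]; rfl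
  | succ m ih =>
    rcases Nat.eq_zero_or_pos m with h | h
    · subst h; rw [show ((0 + 1 : Nat) : Int) = 1 by norm_num,
        PySem.List.pyRange_one_eq_nil (by norm_num)]; rfl
    · have hc : ((m + 1 : Nat) : Int) = (m : Int) + 1 := by push_cast; ring
      rw [hc, PySem.List.pyRange_one_succ_right (by exact_mod_cast h), List.foldl_append,
        ih (by omega)]
      rw [List.foldl_cons, List.foldl_nil, stepA_eq cs _ m h (by omega)]
      have hm : m - 1 + 1 = m := by omega
      conv_rhs => rw [show m + 1 - 1 = m from rfl, ← hm, List.range_succ]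
      simp [hm]

theorem foldB_eq (cs : List Char) (m : Nat) :
    (PySem.List.pyRange 1 (m : Int) 1).foldl (fun ret i => ret ++ [pmtCnt cs i]) [0]
      = (0 : Int) :: (List.range (m - 1)).map (fun t => (borderCnt cs (t + 1) : Int)) := by
  induction m with
  | zero => rw [PySem.List.pyRange_one_eq_nil (by norm_num)]; rfl
  | succ m ih =>
    rcases Nat.eq_zero_or_pos m with h | h
    · subst h; rw [show ((0 + 1 : Nat) : Int) = 1 by norm_num,
        PySem.List.pyRange_one_eq_nil (by norm_num)]; rfl
    · have hc : ((m + 1 : Nat) : Int) = (m : Int) + 1 := by push_cast; ring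
      rw [hc, PySem.List.pyRange_one_succ_right (by exact_mod_cast h), List.foldl_append, ih]
      have hm : m - 1 + 1 = m := by omega
      conv_rhs => rw [show m + 1 - 1 = m from rfl, ← hm, List.range_succ]
      simp [pmtCnt_eq, hm]

-- ===== VERDICT (by name: the statement is the Claim_ definition above) =====
theorem pmt_spec : Claim_equal_pmt := by
  intro s _
  unfold Spec_pmt pmt pmt_alt
  rw [PySem.Str.len_eq, foldA_eq s.toList s.toList.length le_rfl,
    foldB_eq s.toList s.toList.length]
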